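-- pv_equiv track=rewrite | github.com/Mcspunk/WI18-part2 | WIe18/Program.py | laplacian
-- ===== SOURCE A (Python) =====
-- def laplacian(arr,deg):
--     L = []
--     currentVec = []
--     x = 0
--     y = 0
--     for vector in arr:
--         for num in vector:
--             if(x == y): currentVec.append(deg[x])
--             else: currentVec.append(num*-1)
--             x += 1
--         L.append(currentVec)
--         currentVec = []
--         y += 1
--         x = 0
--     return L
-- ===== SOURCE B (Python) =====
-- def laplacian(arr, deg):
--     def go(rows, i):
--         if not rows:
--             return []
--         row = rows[0]
--         left = [-v for v in row[:i]]
--         if i < len(row):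
--             head = left + [deg[i]] + [-v for v in row[i + 1:]]
--         else:
--             head = left
--         return [head] + go(rows[1:], i + 1)
--     return go(arr, 0)
-- ===== Notes on version B (the rewrite author's own statement) =====
-- stated objective: alternative
-- what changed: Replaces A's nested loops with x/y counters and a per-element x==y branch by a recursion over rows that assembles each row by splitting it at the diagonal with slices: negated row[:i] ++ [deg[i]] ++ negated row[i+1:].
import Mathlib
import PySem

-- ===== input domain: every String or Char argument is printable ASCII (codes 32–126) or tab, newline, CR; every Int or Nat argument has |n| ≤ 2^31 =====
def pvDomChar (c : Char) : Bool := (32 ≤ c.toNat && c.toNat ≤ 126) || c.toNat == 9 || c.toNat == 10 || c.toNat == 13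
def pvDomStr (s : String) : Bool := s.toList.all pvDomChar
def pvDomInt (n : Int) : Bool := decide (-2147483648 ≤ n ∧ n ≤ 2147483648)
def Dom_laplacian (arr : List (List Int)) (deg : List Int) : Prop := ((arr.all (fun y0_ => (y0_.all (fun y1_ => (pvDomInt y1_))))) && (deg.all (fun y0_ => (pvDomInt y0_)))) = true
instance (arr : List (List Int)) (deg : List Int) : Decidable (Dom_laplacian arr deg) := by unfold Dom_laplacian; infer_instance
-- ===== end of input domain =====

-- B replaces A's nested counter loops by a recursion over rows that splits each row at the
-- diagonal with slices: a different decomposition, not faster (objective 'alternative').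

-- ===== PORT A =====
-- inner 'for num in vector' loop with the running column counter x (row index y fixed);
-- deg[x] is only reached with x = y and, under Pre_, y < deg.length, so getD's default is never used
def lapInnerA (deg : List Int) (y x : Nat) : List Int → List Int
  | [] => []
  | n :: rest => (if x = y then deg.getD x 0 else n * -1) :: lapInnerA deg y (x + 1) rest

-- outer 'for vector in arr' loop with the running row counter y (x reset to 0 each row)
def lapOuterA (deg : List Int) (y : Nat) : List (List Int) → List (List Int)
  | [] => []
  | v :: rest => lapInnerA deg y 0 v :: lapOuterA deg (y + 1) rest

def laplacian (arr : List (List Int)) (deg : List Int) : List (List Int) :=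
  lapOuterA deg 0 arr

-- ===== PORT B =====
-- one row of B: negate the slice row[:i]; if the diagonal exists, append deg[i] and the
-- negated slice row[i+1:] (deg.getD: under Pre_, i < deg.length whenever i < row.length)
def rowB (deg : List Int) (i : Nat) (row : List Int) : List Int :=
  if i < row.length then
    (row.take i).map (fun v => -v) ++ [deg.getD i 0] ++ (row.drop (i + 1)).map (fun v => -v)
  else
    (row.take i).map (fun v => -v)

-- recursive 'go(rows, i)'
def lapGoB (deg : List Int) : List (List Int) → Nat → List (List Int)
  | [], _ => []
  | row :: rest, i => rowB deg i row :: lapGoB deg rest (i + 1)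

def laplacian_alt (arr : List (List Int)) (deg : List Int) : List (List Int) :=
  lapGoB deg arr 0

-- ===== PRECONDITION & SPEC =====
-- Pre_ excludes exactly the inputs where Python A raises IndexError: a row i that has a
-- diagonal entry (i < len(arr[i])) while deg has no entry i.  (B raises IndexError there too.)
def Pre_laplacian (arr : List (List Int)) (deg : List Int) : Prop :=
  ∀ p ∈ arr.zipIdx, p.2 < p.1.length → p.2 < deg.length
instance (arr : List (List Int)) (deg : List Int) : Decidable (Pre_laplacian arr deg) := by
  unfold Pre_laplacian; infer_instance

def pvWitness_laplacian : List (List Int) × List Int :=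
  ([[0, 1, 2], [3, 4, 5], [6, 7, 8]], [3, 12, 21])

def Spec_laplacian (arr : List (List Int)) (deg : List Int) (out : List (List Int)) : Prop := out = laplacian_alt arr deg
instance (arr : List (List Int)) (deg : List Int) (out : List (List Int)) : Decidable (Spec_laplacian arr deg out) := by unfold Spec_laplacian; infer_instance

-- ===== CLAIM (what is proved, stated in full; the proofs are below) =====
def Claim_equal_laplacian : Prop := ∀ (arr : List (List Int)) (deg : List Int), Dom_laplacian arr deg → Pre_laplacian arr deg → Spec_laplacian arr deg (laplacian arr deg)

-- ===== LEMMAS AND PROOFS =====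

theorem lapInnerA_length (deg : List Int) (y : Nat) :
    ∀ (v : List Int) (x : Nat), (lapInnerA deg y x v).length = v.length := by
  intro v
  induction v with
  | nil => intro x; rfl
  | cons n rest ih => intro x; simp [lapInnerA, ih]

theorem lapInnerA_getElem (deg : List Int) (y : Nat) :
    ∀ (v : List Int) (x j : Nat) (h : j < v.length),
      (lapInnerA deg y x v)[j]'(by rw [lapInnerA_length]; exact h)
        = if x + j = y then deg.getD (x + j) 0 else v[j] * -1 := by
  intro v
  induction v with
  | nil => intro x j h; exact absurd h (by simp)
  | cons n rest ih =>
    intro x j h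
    cases j with
    | zero => simp [lapInnerA]
    | succ k =>
      have hk : k < rest.length := by simpa using h
      simp only [lapInnerA, List.getElem_cons_succ]
      rw [ih (x + 1) k hk]
      have : x + 1 + k = x + (k + 1) := by omega
      simp [this]

theorem rowB_length (deg : List Int) (i : Nat) (row : List Int) :
    (rowB deg i row).length = row.length := by
  unfold rowB
  split <;> simp <;> omega

theorem inner_eq_rowB (deg : List Int) (y : Nat) (v : List Int) :
    lapInnerA deg y 0 v = rowB deg y v := by
  apply List.ext_getElem
  · rw [lapInnerA_length, rowB_length]
  · intro j h1 h2
    have hv : j < v.length := by simpa [lapInnerA_length] using h1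
    rw [lapInnerA_getElem deg y v 0 j hv]
    simp only [Nat.zero_add]
    unfold rowB
    by_cases hy : y < v.length
    · simp only [hy, if_true]
      simp only [List.append_assoc]
      rcases Nat.lt_trichotomy j y with hj | hj | hj
      · have hjt : j < ((v.take y).map (fun v => -v)).length := by
          simp only [List.length_map, List.length_take]; omega
        rw [List.getElem_append_left hjt]
        have hne : ¬ j = y := by omega
        simp only [hne, if_false, List.getElem_map, List.getElem_take]
        ring
      · subst hj
        rw [List.getElem_append_right (by
          simp only [List.length_map, List.length_take]; omega :
          ((v.take j).map (fun v => -v)).length ≤ j)]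
        have hlen : j - ((v.take j).map (fun v => -v)).length = 0 := by
          simp only [List.length_map, List.length_take]; omega
        rw [getElem_congr_idx hlen]
        simp
      · have hne : ¬ j = y := by omega
        simp only [hne, if_false]
        rw [List.getElem_append_right (by simp; omega :
            ((v.take y).map (fun v => -v)).length ≤ j)]
        rw [List.getElem_append_right (by simp; omega :
            ([deg.getD y 0] : List Int).length ≤ j - ((v.take y).map (fun v => -v)).length)]
        simp only [List.getElem_map, List.getElem_drop, List.length_map,
          List.length_take, List.length_cons, List.length_nil]
        rw [getElem_congr_idx (by omega : y + 1 + (j - min y v.length - (0 + 1)) = j)]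
        ring
    · simp only [hy, if_false]
      have hne : ¬ j = y := by omega
      have htk : v.take y = v := List.take_of_length_le (by omega)
      simp [hne, htk]

theorem outer_eq (deg : List Int) :
    ∀ (arr : List (List Int)) (y : Nat),
      lapOuterA deg y arr = lapGoB deg arr y := by
  intro arr
  induction arr with
  | nil => intro y; rfl
  | cons v rest ih =>
    intro y
    simp only [lapOuterA, lapGoB]
    exact congrArg₂ List.cons (inner_eq_rowB deg y v) (ih (y + 1))

-- ===== VERDICT (by name: the statement is the Claim_ definition above) =====
theorem laplacian_spec : Claim_equal_laplacian := by
  intro arr deg _ _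
  unfold Spec_laplacian laplacian laplacian_alt
  exact outer_eq deg arr 0
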